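-- pv_equiv track=rewrite | github.com/sherzai-equinix/Connection-Manager | routers/importer.py | _find_header_map
-- ===== SOURCE A (Python) =====
-- from typing import Any, Dict, List, Optional, Tuple
--
-- def _norm(s: Any) -> str:
--     return ("" if s is None else str(s)).strip()
--
-- def _lower(s: Any) -> str:
--     return _norm(s).lower()
--
-- def _find_header_map(row_values: List[Any]) -> Optional[Dict[str, int]]:
--     """
--     Find ONLY the stable headers:
--       - Product ID
--       - Router Port
--       - HU/PP Z
--
--     Customer + Customer Port will be refined later using sample scoring.
--     """
--     vals = [_lower(v) for v in row_values]
--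
--     def find_first(keys: List[str]) -> Optional[int]:
--         for i, v in enumerate(vals):
--             if not v:
--                 continue
--             for k in keys:
--                 if k in v:
--                     return i
--         return None
--
--     col_product = find_first(["product id", "productid", "product-id"])
--     col_router = find_first(["router port", "routerport", "router-port"])
--     col_hu_pp_z = find_first(["hu / pp z", "hu/pp z", "hu pp z", "pp z", "hu/ppz", "hu ppz"])
--
--     col_eqx_serial = find_first(["eqx serial", "eqx", "serial"])
--
--     if col_product is None or col_router is None or col_hu_pp_z is None:
--         return None
--
--     # placeholders for refinement
--     return {
--         "product_id": col_product,
--         "router_port": col_router,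
--         "z_pp_number": col_hu_pp_z,
--         "customer_name": -1,
--         "z_port_label": -1,
--         "eqx_serial": col_eqx_serial if col_eqx_serial is not None else -1,
--     }
-- ===== SOURCE B (Python) =====
-- from typing import Any, Dict, List, Optional
--
-- def _norm(s: Any) -> str:
--     return ("" if s is None else str(s)).strip()
--
-- def _lower(s: Any) -> str:
--     return _norm(s).lower()
--
-- _PRODUCT_KEYS = ["product id", "productid", "product-id"]
-- _ROUTER_KEYS = ["router port", "routerport", "router-port"]
-- _Z_KEYS = ["hu / pp z", "hu/pp z", "hu pp z", "pp z", "hu/ppz", "hu ppz"]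
-- _EQX_KEYS = ["eqx serial", "eqx", "serial"]
--
-- def _find_header_map(row_values: List[Any]) -> Optional[Dict[str, int]]:
--     vals = [_lower(v) for v in row_values]
--     col_product = col_router = col_hu_pp_z = col_eqx_serial = None
--     for i, v in enumerate(vals):
--         if not v:
--             continue
--         if col_product is None and any(k in v for k in _PRODUCT_KEYS):
--             col_product = i
--         if col_router is None and any(k in v for k in _ROUTER_KEYS):
--             col_router = i
--         if col_hu_pp_z is None and any(k in v for k in _Z_KEYS):
--             col_hu_pp_z = i
--         if col_eqx_serial is None and any(k in v for k in _EQX_KEYS):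
--             col_eqx_serial = i
--     if col_product is None or col_router is None or col_hu_pp_z is None:
--         return None
--     return {
--         "product_id": col_product,
--         "router_port": col_router,
--         "z_pp_number": col_hu_pp_z,
--         "customer_name": -1,
--         "z_port_label": -1,
--         "eqx_serial": col_eqx_serial if col_eqx_serial is not None else -1,
--     }
-- ===== Notes on version B (the rewrite author's own statement) =====
-- stated objective: alternative
-- what changed: Replaces four separate early-returning scans of the lowered values (one per header category) by a single enumerate pass that fills four independent first-match slots; it trades A's early exits for one uniform pass.
import Mathlib
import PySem

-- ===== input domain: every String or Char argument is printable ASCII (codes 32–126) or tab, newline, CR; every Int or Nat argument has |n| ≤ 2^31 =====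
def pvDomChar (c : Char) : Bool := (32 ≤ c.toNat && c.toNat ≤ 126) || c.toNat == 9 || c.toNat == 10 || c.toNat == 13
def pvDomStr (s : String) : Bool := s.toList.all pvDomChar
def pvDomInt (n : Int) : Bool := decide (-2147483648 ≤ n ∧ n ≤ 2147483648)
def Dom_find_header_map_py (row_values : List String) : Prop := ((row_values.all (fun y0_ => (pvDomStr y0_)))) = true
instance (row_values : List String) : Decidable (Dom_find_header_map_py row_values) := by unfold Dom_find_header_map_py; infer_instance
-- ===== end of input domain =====

-- B does the same header detection in ONE pass over the lowered values (four independent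
-- first-match slots) instead of A's four separate full scans; equivalence is proved on all inputs.

-- ===== PORT A =====
-- A-side helpers: _lower = str(s).strip().lower(), and A's key lists
def pyLowerValA (s : String) : String := PySem.Str.lower (PySem.Str.strip s)
def productKeysA : List String := ["product id", "productid", "product-id"]
def routerKeysA : List String := ["router port", "routerport", "router-port"]
def zKeysA : List String := ["hu / pp z", "hu/pp z", "hu pp z", "pp z", "hu/ppz", "hu ppz"]
def eqxKeysA : List String := ["eqx serial", "eqx", "serial"]
-- find_first: scan the enumerated vals; skip empty; return first index whose value contains some key
def findFirstA (keys : List String) : List (Int × String) → Option Int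
  | [] => none
  | (i, v) :: rest =>
      if v = "" then findFirstA keys rest
      else if keys.any (fun k => PySem.Str.isIn k v) then some i
      else findFirstA keys rest

def find_header_map_py (row_values : List String) : Option (List (String × Int)) :=
  let vals := row_values.map pyLowerValA
  let col_product := findFirstA productKeysA (PySem.List.enumerate vals)
  let col_router := findFirstA routerKeysA (PySem.List.enumerate vals)
  let col_hu_pp_z := findFirstA zKeysA (PySem.List.enumerate vals)
  let col_eqx_serial := findFirstA eqxKeysA (PySem.List.enumerate vals)
  match col_product, col_router, col_hu_pp_z with
  | some p, some r, some z =>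
      some [("product_id", p), ("router_port", r), ("z_pp_number", z),
            ("customer_name", -1), ("z_port_label", -1),
            ("eqx_serial", col_eqx_serial.getD (-1))]
  | _, _, _ => none

-- ===== PORT B =====
-- B-side helpers: same trivial _lower and the same key lists, B's own copies
def pyLowerValB (s : String) : String := PySem.Str.lower (PySem.Str.strip s)
def productKeysB : List String := ["product id", "productid", "product-id"]
def routerKeysB : List String := ["router port", "routerport", "router-port"]
def zKeysB : List String := ["hu / pp z", "hu/pp z", "hu pp z", "pp z", "hu/ppz", "hu ppz"]
def eqxKeysB : List String := ["eqx serial", "eqx", "serial"]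
-- one slot update: assign index only if the slot is still empty and some key occurs in v
def updSlot (keys : List String) (a : Option Int) (p : Int × String) : Option Int :=
  if a = none ∧ keys.any (fun k => PySem.Str.isIn k p.2) then some p.1 else a

-- the single-pass loop body: skip empty values, update the four independent slots
def stepB (st : Option Int × Option Int × Option Int × Option Int) (p : Int × String) :
    Option Int × Option Int × Option Int × Option Int :=
  if p.2 = "" then st
  else (updSlot productKeysB st.1 p, updSlot routerKeysB st.2.1 p,
        updSlot zKeysB st.2.2.1 p, updSlot eqxKeysB st.2.2.2 p)

def find_header_map_py_alt (row_values : List String) : Option (List (String × Int)) :=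
  let vals := row_values.map pyLowerValB
  let st := (PySem.List.enumerate vals).foldl stepB (none, none, none, none)
  match st.1 with
  | none => none
  | some p =>
    match st.2.1 with
    | none => none
    | some r =>
      match st.2.2.1 with
      | none => none
      | some z =>
          some [("product_id", p), ("router_port", r), ("z_pp_number", z),
                ("customer_name", -1), ("z_port_label", -1),
                ("eqx_serial", st.2.2.2.getD (-1))]

-- ===== PRECONDITION & SPEC =====
def Spec_find_header_map_py (row_values : List String) (out : Option (List (String × Int))) : Prop := out = find_header_map_py_alt row_values
instance (row_values : List String) (out : Option (List (String × Int))) : Decidable (Spec_find_header_map_py row_values out) := by unfold Spec_find_header_map_py; infer_instance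

-- ===== CLAIM (what is proved, stated in full; the proofs are below) =====
def Claim_equal_find_header_map_py : Prop := ∀ (row_values : List String), Dom_find_header_map_py row_values → Spec_find_header_map_py row_values (find_header_map_py row_values)

-- ===== LEMMAS AND PROOFS =====

-- one-slot version of the loop body (with the empty-value skip folded in)
def upd1 (keys : List String) (a : Option Int) (p : Int × String) : Option Int :=
  if p.2 = "" then a else updSlot keys a p

theorem upd1_some (keys : List String) (x : Int) (p : Int × String) :
    upd1 keys (some x) p = some x := by
  simp [upd1, updSlot]

theorem foldl_upd1_some (keys : List String) (l : List (Int × String)) (x : Int) :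
    l.foldl (upd1 keys) (some x) = some x := by
  induction l with
  | nil => rfl
  | cons p rest ih => simp [List.foldl, upd1_some, ih]

theorem foldl_upd1_none (keys : List String) (l : List (Int × String)) :
    l.foldl (upd1 keys) none = findFirstA keys l := by
  induction l with
  | nil => rfl
  | cons p rest ih =>
    obtain ⟨i, v⟩ := p
    by_cases hv : v = ""
    · simp [List.foldl, upd1, findFirstA, hv, ih]
    · simp only [List.foldl_cons, findFirstA, if_neg hv]
      by_cases hk : keys.any (fun k => PySem.Str.isIn k v) = true
      · have h1 : upd1 keys none (i, v) = some i := by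
          simp [upd1, updSlot, hv]
          simpa using hk
        rw [if_pos hk, h1, foldl_upd1_some]
      · have h1 : upd1 keys none (i, v) = none := by
          simp only [upd1, updSlot, if_neg hv]
          rw [if_neg]; rintro ⟨-, h⟩; exact hk h
        rw [if_neg hk, h1, ih]

-- the components of the big fold are the four independent one-slot folds
theorem foldl_stepB (l : List (Int × String))
    (st : Option Int × Option Int × Option Int × Option Int) :
    l.foldl stepB st
      = (l.foldl (upd1 productKeysB) st.1, l.foldl (upd1 routerKeysB) st.2.1,
         l.foldl (upd1 zKeysB) st.2.2.1, l.foldl (upd1 eqxKeysB) st.2.2.2) := by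
  induction l generalizing st with
  | nil => rfl
  | cons p rest ih =>
    obtain ⟨a, b, c, d⟩ := st
    by_cases hv : p.2 = ""
    · simp [List.foldl, stepB, upd1, hv, ih]
    · simp [List.foldl, stepB, upd1, hv, ih]

-- ===== VERDICT (by name: the statement is the Claim_ definition above) =====
theorem find_header_map_py_spec : Claim_equal_find_header_map_py := by
  intro row_values _
  unfold Spec_find_header_map_py find_header_map_py find_header_map_py_alt
  simp only [foldl_stepB, foldl_upd1_none]
  have hl : pyLowerValA = pyLowerValB := rfl
  have hp : productKeysA = productKeysB := rfl
  have hr : routerKeysA = routerKeysB := rfl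
  have hz : zKeysA = zKeysB := rfl
  have he : eqxKeysA = eqxKeysB := rfl
  rw [hl, hp, hr, hz, he]
  rcases findFirstA productKeysB (PySem.List.enumerate (List.map pyLowerValB row_values)) with _ | p <;>
    rcases findFirstA routerKeysB (PySem.List.enumerate (List.map pyLowerValB row_values)) with _ | r <;>
      rcases findFirstA zKeysB (PySem.List.enumerate (List.map pyLowerValB row_values)) with _ | z <;>
        rfl
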